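-- pv_equiv track=rewrite | github.com/SprihaAnand/DayCraftAI | ai-productivity-assistant/app.py | _categorize_task
-- ===== SOURCE A (Python) =====
-- def _categorize_task(task):
--     """Categorize tasks for better visualization"""
--     task_lower = task.lower()
--     if any(keyword in task_lower for keyword in ['meeting', 'call', 'discussion']):
--         return 'Meetings'
--     elif any(keyword in task_lower for keyword in ['project', 'work', 'develop', 'code']):
--         return 'Deep Work'
--     elif any(keyword in task_lower for keyword in ['email', 'admin', 'organize']):
--         return 'Administrative'
--     elif any(keyword in task_lower for keyword in ['break', 'lunch', 'rest']):
--         return 'Breaks'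
--     elif any(keyword in task_lower for keyword in ['learn', 'read', 'study']):
--         return 'Learning'
--     else:
--         return 'Other'
-- ===== SOURCE B (Python) =====
-- KEYWORDS = [('meeting', 0), ('call', 0), ('discussion', 0),
--             ('project', 1), ('work', 1), ('develop', 1), ('code', 1),
--             ('email', 2), ('admin', 2), ('organize', 2),
--             ('break', 3), ('lunch', 3), ('rest', 3),
--             ('learn', 4), ('read', 4), ('study', 4)]
-- NAMES = ['Meetings', 'Deep Work', 'Administrative', 'Breaks', 'Learning']
--
-- def _categorize_task(task):
--     """Categorize tasks for better visualization"""
--     tl = task.lower()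
--     best = 5  # priority of the best (lowest-index) category matched so far
--     # single left-to-right scan of the text: at each position try every keyword
--     for i in range(len(tl)):
--         for kw, pri in KEYWORDS:
--             if pri < best and tl.startswith(kw, i):
--                 best = pri
--     return NAMES[best] if best < 5 else 'Other'
-- ===== Notes on version B (the rewrite author's own statement) =====
-- stated objective: alternative
-- what changed: Instead of running five groups of independent substring searches in precedence order, B scans the lowered text once position by position, tries every keyword as a prefix at each position (naive multi-pattern matching) while tracking the minimum category priority matched, and maps that minimum back to the category name; the priority minimum reproduces the if/elif precedence.
import Mathlib
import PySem

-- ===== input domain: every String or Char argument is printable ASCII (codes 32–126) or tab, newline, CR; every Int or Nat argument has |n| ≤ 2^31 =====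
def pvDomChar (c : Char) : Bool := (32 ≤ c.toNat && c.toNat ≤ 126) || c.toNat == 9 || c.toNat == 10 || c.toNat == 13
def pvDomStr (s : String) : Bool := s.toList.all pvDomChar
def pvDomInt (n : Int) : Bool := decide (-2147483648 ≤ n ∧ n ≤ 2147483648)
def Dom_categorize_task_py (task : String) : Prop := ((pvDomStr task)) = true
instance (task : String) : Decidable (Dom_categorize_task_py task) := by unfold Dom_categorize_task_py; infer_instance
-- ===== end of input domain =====

-- B replaces A's five independent substring searches by a single positional scan of the text trying every keyword as a prefix at each position, tracking the minimum matched category priority; alternative algorithm, same cost.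


-- ===== PORT A =====
def categorize_task_py (task : String) : String :=
  let task_lower := PySem.Str.lower task
  if ["meeting", "call", "discussion"].any (fun k => PySem.Str.isIn k task_lower) then "Meetings"
  else if ["project", "work", "develop", "code"].any (fun k => PySem.Str.isIn k task_lower) then "Deep Work"
  else if ["email", "admin", "organize"].any (fun k => PySem.Str.isIn k task_lower) then "Administrative"
  else if ["break", "lunch", "rest"].any (fun k => PySem.Str.isIn k task_lower) then "Breaks"
  else if ["learn", "read", "study"].any (fun k => PySem.Str.isIn k task_lower) then "Learning"
  else "Other"

-- ===== PORT B =====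
def kwTable : List (List Char × Nat) :=
  [("meeting".toList, 0), ("call".toList, 0), ("discussion".toList, 0),
   ("project".toList, 1), ("work".toList, 1), ("develop".toList, 1), ("code".toList, 1),
   ("email".toList, 2), ("admin".toList, 2), ("organize".toList, 2),
   ("break".toList, 3), ("lunch".toList, 3), ("rest".toList, 3),
   ("learn".toList, 4), ("read".toList, 4), ("study".toList, 4)]

def catNames : List String := ["Meetings", "Deep Work", "Administrative", "Breaks", "Learning"]

-- tl.startswith(kw, i) with 0 ≤ i ≤ len(tl) is exactly kw <+: tl.drop i
def categorize_task_py_alt (task : String) : String :=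
  let tl := (PySem.Str.lower task).toList
  let best := (List.range tl.length).foldl
    (fun best i => kwTable.foldl
      (fun best p => if p.2 < best ∧ p.1 <+: tl.drop i then p.2 else best) best) 5
  if best < 5 then catNames.getD best "Other" else "Other"

-- ===== PRECONDITION & SPEC =====
def Spec_categorize_task_py (task : String) (out : String) : Prop := out = categorize_task_py_alt task
instance (task : String) (out : String) : Decidable (Spec_categorize_task_py task out) := by unfold Spec_categorize_task_py; infer_instance

-- ===== CLAIM =====
def Claim_equal_categorize_task_py : Prop := ∀ (task : String), Dom_categorize_task_py task → Spec_categorize_task_py task (categorize_task_py task)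

-- ===== LEMMAS AND PROOFS =====

-- the guarded min-update fold is a fold of `min` over the filtered, mapped list
theorem foldl_guard_eq_filter {α : Type} (c : α → Prop) [DecidablePred c] (g : α → Nat) :
    ∀ (l : List α) (b : Nat),
      l.foldl (fun b x => if g x < b ∧ c x then g x else b) b
        = ((l.filter (fun x => decide (c x))).map g).foldl min b := by
  intro l
  induction l with
  | nil => intro b; rfl
  | cons x xs ih =>
    intro b
    simp only [List.foldl_cons, List.filter_cons]
    by_cases hc : c x
    · by_cases hg : g x < b
      · rw [if_pos (show g x < b ∧ c x from ⟨hg, hc⟩), ih, if_pos (by simp [hc])]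
        simp only [List.map_cons, List.foldl_cons]
        congr 1; omega
      · rw [if_neg (fun h => hg h.1), ih, if_pos (by simp [hc])]
        simp only [List.map_cons, List.foldl_cons]
        congr 1; omega
    · rw [if_neg (fun h => hc h.2), ih, if_neg (by simp [hc])]

-- nesting min-folds flattens to a min-fold over the flatMap
theorem foldl_min_flat {α : Type} (f : α → List Nat) :
    ∀ (l : List α) (b : Nat),
      l.foldl (fun b i => (f i).foldl min b) b = (l.flatMap f).foldl min b := by
  intro l
  induction l with
  | nil => intro b; rfl
  | cons x xs ih => intro b; simp only [List.foldl_cons, List.flatMap_cons, List.foldl_append, ih]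

theorem foldl_min_le_init : ∀ (l : List Nat) (b : Nat), l.foldl min b ≤ b := by
  intro l
  induction l with
  | nil => intro b; exact le_rfl
  | cons x xs ih => intro b; exact le_trans (ih (min b x)) (by omega)

theorem foldl_min_le_mem : ∀ (l : List Nat) (b x : Nat), x ∈ l → l.foldl min b ≤ x := by
  intro l
  induction l with
  | nil => intro b x hx; cases hx
  | cons y ys ih =>
    intro b x hx
    rcases List.mem_cons.1 hx with h | h
    · subst h; exact le_trans (foldl_min_le_init ys (min b x)) (by omega)
    · exact ih (min b y) x h

theorem foldl_min_mem_or : ∀ (l : List Nat) (b : Nat), l.foldl min b = b ∨ l.foldl min b ∈ l := by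
  intro l
  induction l with
  | nil => intro b; exact Or.inl rfl
  | cons x xs ih =>
    intro b
    simp only [List.foldl_cons]
    rcases ih (min b x) with h | h
    · rw [h]
      by_cases hx : x < b
      · right
        have hmx : min b x = x := by omega
        rw [hmx]
        exact List.mem_cons.2 (Or.inl rfl)
      · left; omega
    · right; exact List.mem_cons_of_mem x h

-- a nonempty pattern occurring as a prefix of some suffix is an occurrence within range
theorem exists_pos_prefix_iff (kw s : List Char) (h : kw ≠ []) :
    (∃ i ∈ List.range s.length, kw <+: s.drop i) ↔ PySem.Chars.isIn kw s = true := by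
  rw [← PySem.Chars.exists_prefix_drop_iff_isIn]
  constructor
  · rintro ⟨i, _, hp⟩; exact ⟨i, hp⟩
  · rintro ⟨j, hp⟩
    by_cases hj : j < s.length
    · exact ⟨j, List.mem_range.2 hj, hp⟩
    · exfalso
      rw [List.drop_eq_nil_of_le (by omega)] at hp
      exact h (List.prefix_nil.1 hp)

theorem kw_ne_nil : ∀ p ∈ kwTable, p.1 ≠ [] := by decide

-- the nested guarded fold over an abstract table, flattened to a min-fold
theorem nested_eq (s : List Char) (tbl : List (List Char × Nat)) :
    (List.range s.length).foldl
      (fun best i => tbl.foldl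
        (fun best p => if p.2 < best ∧ p.1 <+: s.drop i then p.2 else best) best) 5
    = ((List.range s.length).flatMap
        (fun i => (tbl.filter (fun p => decide (p.1 <+: s.drop i))).map (fun p => p.2))).foldl min 5 := by
  have hfold : ∀ (b i : Nat), tbl.foldl
        (fun best p => if p.2 < best ∧ p.1 <+: s.drop i then p.2 else best) b
      = ((tbl.filter (fun p => decide (p.1 <+: s.drop i))).map (fun p => p.2)).foldl min b :=
    fun b i => foldl_guard_eq_filter (fun p => p.1 <+: s.drop i) (fun p => p.2) tbl b
  simp only [hfold]
  exact foldl_min_flat _ _ _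

set_option maxHeartbeats 2000000 in
theorem categorize_task_py_spec : Claim_equal_categorize_task_py := by
  intro task _
  unfold Spec_categorize_task_py categorize_task_py categorize_task_py_alt
  simp only [PySem.Str.isIn_eq, PySem.Str.toList_lower, List.any_cons, List.any_nil,
    Bool.or_false]
  set s : List Char := PySem.Chars.lower task.toList with hs
  -- rewrite B's nested fold into a min-fold over the matched-priority list
  rw [nested_eq s kwTable]
  set L : List Nat := (List.range s.length).flatMap
    (fun i => (kwTable.filter (fun p => decide (p.1 <+: s.drop i))).map (fun p => p.2)) with hL
  set r : Nat := L.foldl min 5 with hr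
  -- membership in L ↔ some keyword of that priority occurs in s
  have memL : ∀ j : Nat, j ∈ L ↔ ∃ p ∈ kwTable, PySem.Chars.isIn p.1 s = true ∧ p.2 = j := by
    intro j
    constructor
    · intro hj
      rw [hL] at hj
      rcases List.mem_flatMap.1 hj with ⟨i, hi, hji⟩
      rcases List.mem_map.1 hji with ⟨p, hp, hpj⟩
      rcases List.mem_filter.1 hp with ⟨hpt, hpre⟩
      refine ⟨p, hpt, ?_, hpj⟩
      exact (exists_pos_prefix_iff p.1 s (kw_ne_nil p hpt)).1 ⟨i, hi, of_decide_eq_true hpre⟩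
    · rintro ⟨p, hpt, hin, hpj⟩
      have hne : p.1 ≠ [] := kw_ne_nil p hpt
      rcases (exists_pos_prefix_iff p.1 s hne).2 hin with ⟨i, hi, hpre⟩
      rw [hL]
      exact List.mem_flatMap.2 ⟨i, hi,
        List.mem_map.2 ⟨p, List.mem_filter.2 ⟨hpt, decide_eq_true hpre⟩, hpj⟩⟩
  -- group-level booleans
  set M0 := (PySem.Chars.isIn "meeting".toList s || PySem.Chars.isIn "call".toList s ||
    PySem.Chars.isIn "discussion".toList s) with hM0
  set M1 := (PySem.Chars.isIn "project".toList s || PySem.Chars.isIn "work".toList s ||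
    PySem.Chars.isIn "develop".toList s || PySem.Chars.isIn "code".toList s) with hM1
  set M2 := (PySem.Chars.isIn "email".toList s || PySem.Chars.isIn "admin".toList s ||
    PySem.Chars.isIn "organize".toList s) with hM2
  set M3 := (PySem.Chars.isIn "break".toList s || PySem.Chars.isIn "lunch".toList s ||
    PySem.Chars.isIn "rest".toList s) with hM3
  set M4 := (PySem.Chars.isIn "learn".toList s || PySem.Chars.isIn "read".toList s ||
    PySem.Chars.isIn "study".toList s) with hM4
  have memM : ∀ j : Nat, j ∈ L ↔ ((j = 0 ∧ M0 = true) ∨ (j = 1 ∧ M1 = true) ∨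
      (j = 2 ∧ M2 = true) ∨ (j = 3 ∧ M3 = true) ∨ (j = 4 ∧ M4 = true)) := by
    intro j
    rw [memL j]
    unfold kwTable
    constructor
    · rintro ⟨p, hpt, hin, hpj⟩
      simp only [List.mem_cons, List.not_mem_nil, or_false] at hpt
      rcases hpt with h|h|h|h|h|h|h|h|h|h|h|h|h|h|h|h <;>
        (subst h; simp_all [hM0, hM1, hM2, hM3, hM4])
    · intro h
      rcases h with ⟨hj, hm⟩|⟨hj, hm⟩|⟨hj, hm⟩|⟨hj, hm⟩|⟨hj, hm⟩ <;> subst hj <;>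
        simp only [hM0, hM1, hM2, hM3, hM4, Bool.or_eq_true] at hm
      · rcases hm with ((h|h)|h)
        · exact ⟨("meeting".toList, 0), by decide, h, rfl⟩
        · exact ⟨("call".toList, 0), by decide, h, rfl⟩
        · exact ⟨("discussion".toList, 0), by decide, h, rfl⟩
      · rcases hm with (((h|h)|h)|h)
        · exact ⟨("project".toList, 1), by decide, h, rfl⟩
        · exact ⟨("work".toList, 1), by decide, h, rfl⟩
        · exact ⟨("develop".toList, 1), by decide, h, rfl⟩
        · exact ⟨("code".toList, 1), by decide, h, rfl⟩
      · rcases hm with ((h|h)|h)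
        · exact ⟨("email".toList, 2), by decide, h, rfl⟩
        · exact ⟨("admin".toList, 2), by decide, h, rfl⟩
        · exact ⟨("organize".toList, 2), by decide, h, rfl⟩
      · rcases hm with ((h|h)|h)
        · exact ⟨("break".toList, 3), by decide, h, rfl⟩
        · exact ⟨("lunch".toList, 3), by decide, h, rfl⟩
        · exact ⟨("rest".toList, 3), by decide, h, rfl⟩
      · rcases hm with ((h|h)|h)
        · exact ⟨("learn".toList, 4), by decide, h, rfl⟩
        · exact ⟨("read".toList, 4), by decide, h, rfl⟩
        · exact ⟨("study".toList, 4), by decide, h, rfl⟩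
  -- the cascade target
  set t : Nat := if M0 = true then 0 else if M1 = true then 1 else if M2 = true then 2
    else if M3 = true then 3 else if M4 = true then 4 else 5 with ht
  have htL : t = 5 ∨ t ∈ L := by
    rw [ht]
    by_cases m0 : M0 = true
    · right; rw [if_pos m0]; exact (memM 0).2 (Or.inl ⟨rfl, m0⟩)
    · rw [if_neg m0]
      by_cases m1 : M1 = true
      · right; rw [if_pos m1]; exact (memM 1).2 (Or.inr (Or.inl ⟨rfl, m1⟩))
      · rw [if_neg m1]
        by_cases m2 : M2 = true
        · right; rw [if_pos m2]; exact (memM 2).2 (Or.inr (Or.inr (Or.inl ⟨rfl, m2⟩)))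
        · rw [if_neg m2]
          by_cases m3 : M3 = true
          · right; rw [if_pos m3]
            exact (memM 3).2 (Or.inr (Or.inr (Or.inr (Or.inl ⟨rfl, m3⟩))))
          · rw [if_neg m3]
            by_cases m4 : M4 = true
            · right; rw [if_pos m4]
              exact (memM 4).2 (Or.inr (Or.inr (Or.inr (Or.inr ⟨rfl, m4⟩))))
            · left; rw [if_neg m4]
  have htle : ∀ j ∈ L, t ≤ j := by
    intro j hj
    rcases (memM j).1 hj with ⟨hj', hm⟩|⟨hj', hm⟩|⟨hj', hm⟩|⟨hj', hm⟩|⟨hj', hm⟩ <;>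
      subst hj' <;> rw [ht] <;> split_ifs <;> simp_all
  have hrt : r = t := by
    have h1 : r ≤ t := by
      rcases htL with h | h
      · rw [h, hr]; exact foldl_min_le_init L 5
      · rw [hr]; exact foldl_min_le_mem L 5 t h
    have h2 : t ≤ r := by
      rcases foldl_min_mem_or L 5 with h | h
      · have ht5 : t ≤ 5 := by rw [ht]; split_ifs <;> omega
        rw [hr, h]; exact ht5
      · rw [hr]; exact htle _ h
    omega
  rw [hrt, ht]
  have e0 : (PySem.Chars.isIn "meeting".toList s || (PySem.Chars.isIn "call".toList s || PySem.Chars.isIn "discussion".toList s)) = M0 := by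
    rw [hM0]; simp [Bool.or_assoc]
  have e1 : (PySem.Chars.isIn "project".toList s || (PySem.Chars.isIn "work".toList s || (PySem.Chars.isIn "develop".toList s || PySem.Chars.isIn "code".toList s))) = M1 := by
    rw [hM1]; simp [Bool.or_assoc]
  have e2 : (PySem.Chars.isIn "email".toList s || (PySem.Chars.isIn "admin".toList s || PySem.Chars.isIn "organize".toList s)) = M2 := by
    rw [hM2]; simp [Bool.or_assoc]
  have e3 : (PySem.Chars.isIn "break".toList s || (PySem.Chars.isIn "lunch".toList s || PySem.Chars.isIn "rest".toList s)) = M3 := by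
    rw [hM3]; simp [Bool.or_assoc]
  have e4 : (PySem.Chars.isIn "learn".toList s || (PySem.Chars.isIn "read".toList s || PySem.Chars.isIn "study".toList s)) = M4 := by
    rw [hM4]; simp [Bool.or_assoc]
  simp only [e0, e1, e2, e3, e4]
  rcases Bool.eq_false_or_eq_true M0 with h0 | h0 <;>
  rcases Bool.eq_false_or_eq_true M1 with h1 | h1 <;>
  rcases Bool.eq_false_or_eq_true M2 with h2 | h2 <;>
  rcases Bool.eq_false_or_eq_true M3 with h3 | h3 <;>
  rcases Bool.eq_false_or_eq_true M4 with h4 | h4 <;>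
    simp [h0, h1, h2, h3, h4, catNames]
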